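-- pv_equiv track=rewrite | github.com/ItsThompson/keep-in-memory | backend/lambdas/kim-evaluate-recall/lambda_function.py | classify_names
-- ===== SOURCE A (Python) =====
-- def classify_names(item_names, recall_list):
--     """
--     Classify each name in recall_list as true_positive, false_positive, or false_negative.
--     Args:
--         item_names: 2D list where each row represents all possible names for a single ground-truth item
--         recall_list: Flat list of predicted labels (unique names)
--     Returns:
--         List of dictionaries with name and classification
--     """
--     # Create a mapping from name to row indices
--     name_to_rows = {}
--     for row_idx, row in enumerate(item_names):
--         for name in row:
--             if name not in name_to_rows:
--                 name_to_rows[name] = []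
--             name_to_rows[name].append(row_idx)
--
--     # Track which rows have been claimed
--     claimed_rows = set()
--
--     # Lists to store results in order
--     true_positives = []
--     false_positives = []
--
--     # Process each name in recall_list
--     for name in recall_list:
--         if name in name_to_rows:
--             # Find if any of the rows this name maps to are unclaimed
--             found_unclaimed = False
--             for row_idx in name_to_rows[name]:
--                 if row_idx not in claimed_rows:
--                     # This is a true positive - claim the row
--                     claimed_rows.add(row_idx)
--                     true_positives.append({
--                         "name": name,
--                         "classification": "true_positive"
--                     })
--                     found_unclaimed = True
--                     break
--
--             if not found_unclaimed:
--                 # All rows this name maps to are already claimed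
--                 false_positives.append({
--                     "name": name,
--                     "classification": "false_positive"
--                 })
--         else:
--             # Name doesn't match any row
--             false_positives.append({
--                 "name": name,
--                 "classification": "false_positive"
--             })
--
--     # Find false negatives (unclaimed rows)
--     false_negatives = []
--     for row_idx, row in enumerate(item_names):
--         if row_idx not in claimed_rows:
--             # Use the first name from the unclaimed row
--             first_name = row[0]
--             false_negatives.append({
--                 "name": first_name,
--                 "classification": "false_negative"
--             })
--
--     # Return in the specified order: true_positives, false_negatives, false_positives
--     return true_positives + false_negatives + false_positives
-- ===== SOURCE B (Python) =====
-- def classify_names(item_names, recall_list):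
--     # Two staged passes: first resolve every recall name to its claimed row (or
--     # None) by scanning rows directly; then build the three output lists by
--     # comprehensions over the resolved hits / the unclaimed rows.
--     claimed = set()
--     hits = []
--     for name in recall_list:
--         hit = next((i for i, row in enumerate(item_names)
--                     if i not in claimed and name in row), None)
--         if hit is not None:
--             claimed.add(hit)
--         hits.append((name, hit))
--     tps = [{"name": n, "classification": "true_positive"} for n, h in hits if h is not None]
--     fps = [{"name": n, "classification": "false_positive"} for n, h in hits if h is None]
--     fns = [{"name": row[0], "classification": "false_negative"}
--            for i, row in enumerate(item_names) if i not in claimed]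
--     return tps + fns + fps
-- ===== Notes on version B (the rewrite author's own statement) =====
-- stated objective: simpler
-- what changed: Drops A's name_to_rows index and its single interleaved bookkeeping loop: B first resolves each recall name to the first unclaimed row containing it by a direct row scan that stops at the first unclaimed match, recording a hits list, then builds the three output lists by comprehensions over the hits and the unclaimed rows.
import Mathlib
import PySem

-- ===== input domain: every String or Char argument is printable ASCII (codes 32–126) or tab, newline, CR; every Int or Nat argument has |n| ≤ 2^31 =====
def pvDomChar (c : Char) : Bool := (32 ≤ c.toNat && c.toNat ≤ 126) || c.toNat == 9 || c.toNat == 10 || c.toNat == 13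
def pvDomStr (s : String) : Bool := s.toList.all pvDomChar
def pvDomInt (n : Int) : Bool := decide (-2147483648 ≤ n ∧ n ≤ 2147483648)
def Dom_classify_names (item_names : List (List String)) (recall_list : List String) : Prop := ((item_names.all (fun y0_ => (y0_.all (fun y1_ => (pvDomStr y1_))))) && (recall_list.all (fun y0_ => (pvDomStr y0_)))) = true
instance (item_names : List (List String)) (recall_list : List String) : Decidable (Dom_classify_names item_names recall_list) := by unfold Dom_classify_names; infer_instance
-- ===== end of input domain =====

-- B drops A's name->rows index and its interleaved loop: it resolves each recall name by a direct first-unclaimed-row scan into a staged hits list, then builds the outputs by filter/map passes (simpler decomposition; same greedy result).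


-- ===== PORT A =====
def pvEntry (n c : String) : List (String × String) := [("name", n), ("classification", c)]

-- inner loop 'for name in row: if name not in d: d[name]=[]; d[name].append(row_idx)'
def pvBuildRow (d : PySem.Dict String (List Int)) (i : Int) (row : List String) : PySem.Dict String (List Int) :=
  row.foldl (fun d name => d.modify name [] (fun l => l ++ [i])) d

def pvBuildDict (item_names : List (List String)) : PySem.Dict String (List Int) :=
  (PySem.List.enumerate item_names 0).foldl (fun d p => pvBuildRow d p.1 p.2) PySem.Dict.empty

-- 'for row_idx in name_to_rows[name]: if row_idx not in claimed_rows: break' — the claimed index, if any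
def pvFirstUnclaimed (idxs : List Int) (claimed : PySem.Set Int) : Option Int :=
  match idxs with
  | [] => none
  | i :: rest => if claimed.contains i then pvFirstUnclaimed rest claimed else some i

def pvStepA (d : PySem.Dict String (List Int))
    (st : PySem.Set Int × List (List (String × String)) × List (List (String × String)))
    (name : String) : PySem.Set Int × List (List (String × String)) × List (List (String × String)) :=
  if d.contains name then
    match pvFirstUnclaimed (d.getD name []) st.1 with
    | some i => (st.1.add i, st.2.1 ++ [pvEntry name "true_positive"], st.2.2)
    | none => (st.1, st.2.1, st.2.2 ++ [pvEntry name "false_positive"])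
  else (st.1, st.2.1, st.2.2 ++ [pvEntry name "false_positive"])

def classify_names (item_names : List (List String)) (recall_list : List String) : List (List (String × String)) :=
  let d := pvBuildDict item_names
  let st := recall_list.foldl (pvStepA d) (PySem.Set.empty, [], [])
  -- row[0] raises IndexError on an empty row: Pre_ excludes empty rows, so headD's default is never read
  let fns := (PySem.List.enumerate item_names 0).foldl (fun acc p =>
      if st.1.contains p.1 then acc else acc ++ [pvEntry (p.2.headD "") "false_negative"]) ([] : List (List (String × String)))
  st.2.1 ++ fns ++ st.2.2

-- ===== PORT B =====
def pvRec (n c : String) : List (String × String) := [("name", n), ("classification", c)]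

-- 'next((i for i, row in enumerate(item_names) if i not in claimed and name in row), None)'
def pvHit (name : String) (claimed : PySem.Set Int) : List (Int × List String) → Option Int
  | [] => none
  | (i, row) :: rest => if !claimed.contains i && row.contains name then some i else pvHit name claimed rest

-- first pass: resolve every recall name, threading the claimed set; returns (hits, claimed)
def pvHits (rows : List (Int × List String)) : List String → PySem.Set Int →
    List (String × Option Int) × PySem.Set Int
  | [], c => ([], c)
  | n :: ns, c =>
    match pvHit n c rows with
    | some i => let r := pvHits rows ns (c.add i); ((n, some i) :: r.1, r.2)
    | none => let r := pvHits rows ns c; ((n, none) :: r.1, r.2)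

def classify_names_alt (item_names : List (List String)) (recall_list : List String) : List (List (String × String)) :=
  let r := pvHits (PySem.List.enumerate item_names 0) recall_list PySem.Set.empty
  let tps := (r.1.filter (fun p => p.2.isSome)).map (fun p => pvRec p.1 "true_positive")
  let fps := (r.1.filter (fun p => p.2.isNone)).map (fun p => pvRec p.1 "false_positive")
  -- row[0] raises IndexError on an empty row: Pre_ excludes empty rows, so headD's default is never read
  let fns := ((PySem.List.enumerate item_names 0).filter (fun p => !r.2.contains p.1)).map
      (fun p => pvRec (p.2.headD "") "false_negative")
  tps ++ fns ++ fps

-- ===== PRECONDITION & SPEC =====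
-- Pre_ excludes inputs with an empty row: every empty row is unclaimable, so both Pythons raise IndexError at row[0].
def Pre_classify_names (item_names : List (List String)) (recall_list : List String) : Prop :=
  ∀ row ∈ item_names, row ≠ []
instance (item_names : List (List String)) (recall_list : List String) : Decidable (Pre_classify_names item_names recall_list) := by unfold Pre_classify_names; infer_instance
def pvWitness_classify_names : List (List String) × List String := ([["a"], ["b", "c"]], ["a", "x", "c"])

def Spec_classify_names (item_names : List (List String)) (recall_list : List String) (out : List (List (String × String))) : Prop := out = classify_names_alt item_names recall_list
instance (item_names : List (List String)) (recall_list : List String) (out : List (List (String × String))) : Decidable (Spec_classify_names item_names recall_list out) := by unfold Spec_classify_names; infer_instance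

-- ===== CLAIM (what is proved, stated in full; the proofs are below) =====
def Claim_equal_classify_names : Prop := ∀ (item_names : List (List String)) (recall_list : List String), Dom_classify_names item_names recall_list → Pre_classify_names item_names recall_list → Spec_classify_names item_names recall_list (classify_names item_names recall_list)

-- ===== LEMMAS AND PROOFS =====

-- occurrences of `name`: one copy of the row index per occurrence in the row, rows in ascending order from k
def pvOccs (name : String) : List (List String) → Int → List Int
  | [], _ => []
  | row :: rows, k => (row.filter (· == name)).map (fun _ => k) ++ pvOccs name rows (k + 1)

theorem pvBuildRow_getD (row : List String) (d : PySem.Dict String (List Int)) (i : Int) (n : String) :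
    (pvBuildRow d i row).getD n [] = d.getD n [] ++ (row.filter (· == n)).map (fun _ => i) := by
  induction row generalizing d with
  | nil => simp [pvBuildRow]
  | cons a row ih =>
    simp only [pvBuildRow, List.foldl_cons] at *
    rw [ih]
    by_cases h : n = a
    · subst h
      simp [PySem.Dict.getD_modify_self]
    · rw [PySem.Dict.getD_modify_of_ne _ _ _ h]
      simp [Ne.symm h]

theorem pvBuildRow_contains (row : List String) (d : PySem.Dict String (List Int)) (i : Int) (n : String) :
    (pvBuildRow d i row).contains n = (d.contains n || row.contains n) := by
  induction row generalizing d with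
  | nil => simp [pvBuildRow]
  | cons a row ih =>
    simp only [pvBuildRow, List.foldl_cons] at *
    rw [ih, PySem.Dict.contains_modify]
    by_cases h : n = a
    · subst h; simp
    · rw [beq_eq_false_iff_ne.mpr h, Bool.false_or]
      simp [h]

theorem pvBuildDict_getD (rows : List (List String)) (s : Int) (d : PySem.Dict String (List Int)) (n : String) :
    ((PySem.List.enumerate rows s).foldl (fun d p => pvBuildRow d p.1 p.2) d).getD n []
      = d.getD n [] ++ pvOccs n rows s := by
  induction rows generalizing s d with
  | nil => simp [PySem.List.enumerate_nil, pvOccs]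
  | cons row rows ih =>
    rw [PySem.List.enumerate_cons]
    simp only [List.foldl_cons]
    rw [ih, pvBuildRow_getD, pvOccs, List.append_assoc]

theorem pvBuildDict_contains (rows : List (List String)) (s : Int) (d : PySem.Dict String (List Int)) (n : String) :
    ((PySem.List.enumerate rows s).foldl (fun d p => pvBuildRow d p.1 p.2) d).contains n
      = (d.contains n || rows.any (fun row => row.contains n)) := by
  induction rows generalizing s d with
  | nil => simp [PySem.List.enumerate_nil]
  | cons row rows ih =>
    rw [PySem.List.enumerate_cons]
    simp only [List.foldl_cons]
    rw [ih, pvBuildRow_contains]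
    cases hd : d.contains n <;> simp [Bool.or_left_comm]

theorem pvOccs_nil_of_not_mem (rows : List (List String)) (s : Int) (n : String)
    (h : rows.any (fun row => row.contains n) = false) : pvOccs n rows s = [] := by
  induction rows generalizing s with
  | nil => rfl
  | cons row rows ih =>
    simp only [List.any_cons, Bool.or_eq_false_iff] at h
    simp only [pvOccs, ih _ h.2, List.append_nil]
    have hfil : row.filter (· == n) = [] := by
      rw [List.filter_eq_nil_iff]
      intro a ha
      simp only [beq_iff_eq]
      intro hEq; subst hEq
      exact absurd ha (by simpa using h.1)
    simp [hfil]

theorem pvFirstUnclaimed_const_append (l : List String) (k : Int) (rest : List Int) (c : PySem.Set Int) :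
    pvFirstUnclaimed (l.map (fun _ => k) ++ rest) c
      = if !l.isEmpty && !c.contains k then some k else pvFirstUnclaimed rest c := by
  induction l with
  | nil => simp
  | cons a l ih =>
    simp only [List.map_cons, List.cons_append, pvFirstUnclaimed, List.isEmpty_cons]
    cases h : PySem.Set.contains c k with
    | false => simp
    | true => rw [if_pos rfl, ih, h]; simp

theorem pvFilter_isEmpty (row : List String) (n : String) :
    (row.filter (· == n)).isEmpty = !row.contains n := by
  induction row with
  | nil => simp
  | cons a row ihr =>
    by_cases h : a = n
    · subst h; simp [List.filter_cons]
    · have hba : (a == n) = false := by simp [h]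
      simp [hba, ihr]
      exact fun _ he => h he.symm

theorem pvHit_eq_firstUnclaimed (rows : List (List String)) (s : Int) (n : String) (c : PySem.Set Int) :
    pvHit n c (PySem.List.enumerate rows s) = pvFirstUnclaimed (pvOccs n rows s) c := by
  induction rows generalizing s with
  | nil => simp [PySem.List.enumerate_nil, pvOccs, pvHit, pvFirstUnclaimed]
  | cons row rows ih =>
    rw [PySem.List.enumerate_cons]
    simp only [pvHit, pvOccs]
    rw [pvFirstUnclaimed_const_append, pvFilter_isEmpty, ih]
    cases hcl : PySem.Set.contains c s <;> cases hm : row.contains n <;>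
      simp only [hcl, hm, Bool.not_true, Bool.not_false, Bool.not_not, Bool.false_and,
        Bool.and_false, Bool.true_and, Bool.and_true, if_true, if_false]

-- A's lookup (dict membership + first-unclaimed scan of the index list) equals B's direct row scan
theorem pvLookup_eq (item_names : List (List String)) (n : String) (c : PySem.Set Int) :
    (if (pvBuildDict item_names).contains n then
        pvFirstUnclaimed ((pvBuildDict item_names).getD n []) c else none)
      = pvHit n c (PySem.List.enumerate item_names 0) := by
  rw [pvHit_eq_firstUnclaimed]
  unfold pvBuildDict
  rw [pvBuildDict_getD, pvBuildDict_contains, PySem.Dict.getD_empty, PySem.Dict.contains_empty,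
    Bool.false_or, List.nil_append]
  cases hany : item_names.any (fun row => row.contains n) with
  | true => rw [if_pos rfl]
  | false =>
    rw [if_neg (by simp), pvOccs_nil_of_not_mem _ _ _ hany]
    rfl

-- A's single interleaved fold equals B's staged hits pass followed by the two filter/map passes
theorem pvFold_eq_hits (item_names : List (List String)) (ns : List String)
    (c : PySem.Set Int) (tp fp : List (List (String × String))) :
    ns.foldl (pvStepA (pvBuildDict item_names)) (c, tp, fp)
      = ((pvHits (PySem.List.enumerate item_names 0) ns c).2,
         tp ++ ((pvHits (PySem.List.enumerate item_names 0) ns c).1.filter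
                  (fun p => p.2.isSome)).map (fun p => pvRec p.1 "true_positive"),
         fp ++ ((pvHits (PySem.List.enumerate item_names 0) ns c).1.filter
                  (fun p => p.2.isNone)).map (fun p => pvRec p.1 "false_positive")) := by
  induction ns generalizing c tp fp with
  | nil => simp [pvHits]
  | cons n ns ih =>
    simp only [List.foldl_cons]
    have hstep : pvStepA (pvBuildDict item_names) (c, tp, fp) n
        = match pvHit n c (PySem.List.enumerate item_names 0) with
          | some i => (c.add i, tp ++ [pvEntry n "true_positive"], fp)
          | none => (c, tp, fp ++ [pvEntry n "false_positive"]) := by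
      unfold pvStepA
      rw [← pvLookup_eq]
      by_cases h : (pvBuildDict item_names).contains n
      · rw [if_pos h, if_pos h]
      · rw [if_neg h, if_neg h]
    rw [hstep]
    cases hh : pvHit n c (PySem.List.enumerate item_names 0) with
    | some i =>
      simp only [pvHits, hh, ih, List.filter_cons, Option.isSome_some, Option.isNone_some,
        if_true, Bool.false_eq_true, if_false, List.map_cons, List.append_assoc,
        List.singleton_append, pvEntry, pvRec]
    | none =>
      simp only [pvHits, hh, ih, List.filter_cons, Option.isSome_none, Option.isNone_none,
        Bool.false_eq_true, if_false, if_true, List.map_cons, List.append_assoc,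
        List.singleton_append, pvEntry, pvRec]

-- A's append-accumulator FN loop equals B's filter/map pass
theorem pvFnFold_eq (l : List (Int × List String)) (c : PySem.Set Int)
    (acc : List (List (String × String))) :
    l.foldl (fun acc p => if c.contains p.1 then acc else acc ++ [pvEntry (p.2.headD "") "false_negative"]) acc
      = acc ++ (l.filter (fun p => !c.contains p.1)).map (fun p => pvRec (p.2.headD "") "false_negative") := by
  induction l generalizing acc with
  | nil => simp
  | cons p l ih =>
    cases h : c.contains p.1 with
    | true =>
      simp only [List.foldl_cons, List.filter_cons, h, if_true, Bool.not_true,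
        Bool.false_eq_true, if_false]
      exact ih acc
    | false =>
      simp only [List.foldl_cons, List.filter_cons, h, Bool.false_eq_true, if_false,
        Bool.not_false, if_true, List.map_cons]
      rw [ih]
      simp [pvEntry, pvRec]

-- ===== VERDICT (by name: the statement is the Claim_ definition above) =====
theorem classify_names_spec : Claim_equal_classify_names := by
  intro item_names recall_list _ _
  unfold Spec_classify_names
  show classify_names item_names recall_list = classify_names_alt item_names recall_list
  unfold classify_names classify_names_alt
  simp only [pvFold_eq_hits, pvFnFold_eq, List.nil_append]
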